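-- pv_equiv track=rewrite | github.com/JaredLGillespie/InterviewBit | Python/delete-and-conquer.py | deleteandconquer
-- ===== SOURCE A (Python) =====
-- def deleteandconquer(A):
--     f = {}
--     b = 0
--     for a in A:
--         if a not in f: f[a] = 0
--         f[a] += 1
--         b = max(b, f[a])
--     return len(A) - b
-- ===== SOURCE B (Python) =====
-- def deleteandconquer(A):
--     s = sorted(A)
--     best = 0
--     run = 0
--     prev = None
--     for x in s:
--         if prev is not None and x == prev:
--             run += 1
--         else:
--             run = 1
--             prev = x
--         if run > best:
--             best = run
--     return len(A) - best
-- ===== Notes on version B (the rewrite author's own statement) =====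
-- stated objective: alternative
-- what changed: B abandons A's hash-table frequency counting with an inline running maximum: it sorts the list so equal elements become contiguous, then scans once for the longest run of equal neighbours (the maximum multiplicity), returning len(A) minus that run length.
import Mathlib
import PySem

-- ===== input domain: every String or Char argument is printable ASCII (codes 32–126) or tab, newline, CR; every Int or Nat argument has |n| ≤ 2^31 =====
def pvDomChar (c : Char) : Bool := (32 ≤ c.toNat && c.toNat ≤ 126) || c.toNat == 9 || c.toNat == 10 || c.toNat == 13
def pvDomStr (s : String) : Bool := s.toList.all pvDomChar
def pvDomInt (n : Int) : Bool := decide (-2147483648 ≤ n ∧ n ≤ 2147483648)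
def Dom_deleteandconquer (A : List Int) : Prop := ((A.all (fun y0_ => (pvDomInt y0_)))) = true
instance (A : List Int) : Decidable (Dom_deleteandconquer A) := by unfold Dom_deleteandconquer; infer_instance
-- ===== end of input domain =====

-- B sorts the list and scans for the longest run of equal neighbours instead of A's dict counting with an inline running maximum (alternative algorithm, O(n log n) vs O(n)).


-- ===== PORT A =====
def deleteandconquer (A : List Int) : Int :=
  let st := A.foldl (fun (fb : PySem.Dict Int Int × Int) a =>
    let f0 := if fb.1.contains a then fb.1 else fb.1.insert a 0
    let f := f0.insert a (f0.getD a 0 + 1)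
    (f, max fb.2 (f.getD a 0))) (PySem.Dict.empty, 0)
  (A.length : Int) - st.2

-- ===== PORT B =====
-- loop body of Source B: "if prev is not None and x == prev: run += 1 else: run = 1; prev = x; if run > best: best = run"
def dqStep (st : Int × Int × Option Int) (x : Int) : Int × Int × Option Int :=
  if st.2.2 = some x then
    let run := st.2.1 + 1
    (if run > st.1 then run else st.1, run, st.2.2)
  else
    (if 1 > st.1 then 1 else st.1, 1, some x)

def deleteandconquer_alt (A : List Int) : Int :=
  let s := PySem.List.sorted A (fun x => x) false
  let st := s.foldl dqStep (0, 0, none)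
  (A.length : Int) - st.1

-- ===== PRECONDITION & SPEC =====
def Spec_deleteandconquer (A : List Int) (out : Int) : Prop := out = deleteandconquer_alt A
instance (A : List Int) (out : Int) : Decidable (Spec_deleteandconquer A out) := by unfold Spec_deleteandconquer; infer_instance

-- ===== CLAIM (what is proved, stated in full; the proofs are below) =====
def Claim_equal_deleteandconquer : Prop := ∀ (A : List Int), Dom_deleteandconquer A → Spec_deleteandconquer A (deleteandconquer A)

-- ===== LEMMAS AND PROOFS =====

-- A's per-iteration dict update ("insert 0 if absent, then += 1") is one counting insert.
lemma dict_step (d : PySem.Dict Int Int) (a : Int) :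
    (if d.contains a then d else d.insert a 0).insert a
      ((if d.contains a then d else d.insert a 0).getD a 0 + 1)
    = d.insert a (d.getD a 0 + 1) := by
  by_cases h : d.contains a = true
  · simp [h]
  · simp only [Bool.not_eq_true] at h
    simp [h, PySem.Dict.getD_insert_self, PySem.Dict.insert_insert_self,
      PySem.Dict.getD_of_not_contains d 0 h]

-- max commutes through a running-max fold.
lemma foldl_max_shift (l : List Int) (g : Int → Int) (i j : Int) :
    l.foldl (fun acc x => max acc (g x)) (max i j)
      = max (l.foldl (fun acc x => max acc (g x)) i) j := by
  induction l generalizing i with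
  | nil => rfl
  | cons a t ih =>
      simp only [List.foldl_cons]
      rw [max_right_comm i j (g a), ih]

-- A's running maximum equals a fold of the FINAL counts over the traversed elements.
lemma loop_snd (l : List Int) (d : PySem.Dict Int Int) (b : Int) :
    (l.foldl (fun (fb : PySem.Dict Int Int × Int) a =>
      (fb.1.insert a (fb.1.getD a 0 + 1), max fb.2 (fb.1.getD a 0 + 1))) (d, b)).2
    = l.foldl (fun acc x =>
        max acc ((l.foldl (fun d x => d.insert x (d.getD x 0 + 1)) d).getD x 0)) b := by
  induction l generalizing d b with
  | nil => rfl
  | cons a t ih =>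
      simp only [List.foldl_cons]
      rw [ih]
      have hfin : (t.foldl (fun d x => d.insert x (d.getD x 0 + 1))
            (d.insert a (d.getD a 0 + 1))).getD a 0
          = d.getD a 0 + 1 + (t.count a : Int) := by
        rw [PySem.Dict.getD_foldl_insert_add_one, PySem.Dict.getD_insert_self]
      rw [hfin]
      by_cases hm : a ∈ t
      · rw [foldl_max_shift, foldl_max_shift]
        have hle := (PySem.List.le_foldl_max_int t
          (fun x => (t.foldl (fun d x => d.insert x (d.getD x 0 + 1))
            (d.insert a (d.getD a 0 + 1))).getD x 0) b).2 a hm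
        rw [hfin] at hle
        have hc : (0 : Int) ≤ (t.count a : Int) := by positivity
        omega
      · rw [List.count_eq_zero_of_not_mem hm]
        norm_num

-- A's answer in closed form: length minus the running max of the multiplicities.
lemma A_max (A : List Int) :
    deleteandconquer A
      = (A.length : Int) - A.foldl (fun acc x => max acc ((A.count x : Int))) 0 := by
  unfold deleteandconquer
  simp only [dict_step, PySem.Dict.getD_insert_self]
  rw [loop_snd]
  simp only [PySem.Dict.foldl_insert_getD_add_one_eq_counter, PySem.Dict.getD_counter]

-- a projected running max is bounded by any common upper bound.
lemma foldl_max_le (l : List Int) (f : Int → Int) (z init : Int)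
    (h0 : init ≤ z) (h : ∀ x ∈ l, f x ≤ z) :
    l.foldl (fun acc x => max acc (f x)) init ≤ z := by
  induction l generalizing init with
  | nil => exact h0
  | cons a t ih =>
      simp only [List.foldl_cons]
      exact ih _ (max_le h0 (h a (by simp))) (fun x hx => h x (by simp [hx]))

-- the B loop invariant over a sorted list p ++ [a]: best = max multiplicity, run = count of the last element.
lemma run_inv (p : List Int) (a : Int) (h : (p ++ [a]).Pairwise (· ≤ ·)) :
    (p ++ [a]).foldl dqStep (0, 0, none)
      = ((p ++ [a]).foldl (fun acc x => max acc (((p ++ [a]).count x : Int))) 0,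
         (((p ++ [a]).count a : Int)), some a) := by
  induction p using List.reverseRecOn generalizing a with
  | nil => simp [dqStep]
  | append_singleton q b ih =>
      have hqb : (q ++ [b]).Pairwise (· ≤ ·) :=
        h.sublist (List.sublist_append_left _ _)
      have hle : b ≤ a := by
        have := List.pairwise_append.mp h
        exact this.2.2 b (by simp) a (by simp)
      have hb_max : ∀ x ∈ q ++ [b], x ≤ b := by
        have := List.pairwise_append.mp hqb
        intro x hx
        rcases List.mem_append.mp hx with hq | hs
        · exact this.2.2 x hq b (by simp)
        · simp at hs; omega
      have key : ∀ x : Int, (((q ++ [b] ++ [a]).count x : Int))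
          = (((q ++ [b]).count x : Int)) + (if a = x then 1 else 0) := by
        intro x
        by_cases hx : a = x
        · rw [if_pos hx, List.count_append, List.count_singleton', if_pos hx]
          push_cast; ring
        · rw [if_neg hx, List.count_append, List.count_singleton', if_neg hx]
          push_cast; ring
      conv_lhs => rw [List.foldl_append, ih b hqb]
      conv_rhs => rw [List.foldl_append]
      simp only [List.foldl_cons, List.foldl_nil, key, if_true]
      have h0c : (0 : Int) ≤ (q ++ [b]).foldl
          (fun acc x => max acc (((q ++ [b]).count x : Int))) 0 :=
        (PySem.List.le_foldl_max_int (q ++ [b]) (fun x => (((q ++ [b]).count x : Int))) 0).1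
      by_cases hab : b = a
      · subst hab
        have hstep : dqStep
            ((q ++ [b]).foldl (fun acc x => max acc (((q ++ [b]).count x : Int))) 0,
              (((q ++ [b]).count b : Int)), some b) b
            = (if ((q ++ [b]).count b : Int) + 1
                  > (q ++ [b]).foldl (fun acc x => max acc (((q ++ [b]).count x : Int))) 0
               then ((q ++ [b]).count b : Int) + 1
               else (q ++ [b]).foldl (fun acc x => max acc (((q ++ [b]).count x : Int))) 0,
               ((q ++ [b]).count b : Int) + 1, some b) := by
          simp [dqStep]
        rw [hstep]
        have h2 : (q ++ [b]).foldl (fun acc x => max acc (((q ++ [b]).count x : Int))) 0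
            ≤ (q ++ [b]).foldl
                (fun acc x => max acc ((((q ++ [b]).count x : Int)) + (if b = x then 1 else 0))) 0 := by
          apply foldl_max_le
          · exact (PySem.List.le_foldl_max_int (q ++ [b])
              (fun x => (((q ++ [b]).count x : Int)) + (if b = x then 1 else 0)) 0).1
          · intro x hx
            refine le_trans ?_ ((PySem.List.le_foldl_max_int (q ++ [b])
              (fun x => (((q ++ [b]).count x : Int)) + (if b = x then 1 else 0)) 0).2 x hx)
            split <;> omega
        have h1 : (q ++ [b]).foldl
            (fun acc x => max acc ((((q ++ [b]).count x : Int)) + (if b = x then 1 else 0))) 0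
            ≤ max ((q ++ [b]).foldl (fun acc x => max acc (((q ++ [b]).count x : Int))) 0)
                (((q ++ [b]).count b : Int) + 1) := by
          apply foldl_max_le
          · exact le_trans h0c (le_max_left _ _)
          · intro x hx
            by_cases hbx : b = x
            · subst hbx; simp
            · simp only [if_neg hbx, add_zero]
              exact le_trans ((PySem.List.le_foldl_max_int (q ++ [b])
                (fun x => (((q ++ [b]).count x : Int))) 0).2 x hx) (le_max_left _ _)
        have hmax : max ((q ++ [b]).foldl
              (fun acc x => max acc ((((q ++ [b]).count x : Int)) + (if b = x then 1 else 0))) 0)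
              (((q ++ [b]).count b : Int) + 1)
            = max ((q ++ [b]).foldl (fun acc x => max acc (((q ++ [b]).count x : Int))) 0)
              (((q ++ [b]).count b : Int) + 1) :=
          le_antisymm (max_le h1 (le_max_right _ _))
            (max_le (h2.trans (le_max_left _ _)) (le_max_right _ _))
        refine Prod.ext ?_ rfl
        rw [hmax]
        split_ifs with hh
        · exact (max_eq_right (by omega)).symm
        · exact (max_eq_left (by omega)).symm
      · have ha_not : a ∉ q ++ [b] := by
          intro hmem
          exact hab ((le_antisymm (hb_max a hmem) hle).symm)
        have hca : (((q ++ [b]).count a : Int)) = 0 := by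
          rw [List.count_eq_zero_of_not_mem ha_not]; rfl
        have hcongr : (q ++ [b]).foldl
            (fun acc x => max acc ((((q ++ [b]).count x : Int)) + (if a = x then 1 else 0))) 0
            = (q ++ [b]).foldl (fun acc x => max acc (((q ++ [b]).count x : Int))) 0 := by
          apply PySem.List.foldl_congr_mem
          intro acc x hx
          have hax : ¬ (a = x) := fun he => ha_not (he ▸ hx)
          rw [if_neg hax, add_zero]
        have hstep : dqStep
            ((q ++ [b]).foldl (fun acc x => max acc (((q ++ [b]).count x : Int))) 0,
              (((q ++ [b]).count b : Int)), some b) a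
            = (if 1 > (q ++ [b]).foldl (fun acc x => max acc (((q ++ [b]).count x : Int))) 0
               then 1
               else (q ++ [b]).foldl (fun acc x => max acc (((q ++ [b]).count x : Int))) 0,
               1, some a) := by
          simp [dqStep, hab]
        rw [hstep, hcongr, hca]
        refine Prod.ext ?_ rfl
        norm_num

-- B's answer in the same closed form.
lemma B_max (A : List Int) :
    deleteandconquer_alt A
      = (A.length : Int) - A.foldl (fun acc x => max acc ((A.count x : Int))) 0 := by
  unfold deleteandconquer_alt
  rcases (PySem.List.sorted A (fun x => x) false).eq_nil_or_concat with hnil | ⟨p, a, hconc⟩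
  all_goals try rw [List.concat_eq_append] at hconc
  · have hA : A = [] := by
      have := PySem.List.sorted_perm A (fun x => x) false
      rw [hnil] at this
      exact this.symm.eq_nil
    subst hA; rfl
  · have hperm : (p ++ [a]).Perm A := by
      have := PySem.List.sorted_perm A (fun x => x) false
      rwa [hconc] at this
    have hpw : (p ++ [a]).Pairwise (· ≤ ·) := by
      have := PySem.List.sorted_pairwise A (fun x => x)
      rwa [hconc] at this
    simp only [hconc, run_inv p a hpw]
    congr 1
    have hcnt : (p ++ [a]).foldl (fun acc x => max acc (((p ++ [a]).count x : Int))) 0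
        = (p ++ [a]).foldl (fun acc x => max acc ((A.count x : Int))) 0 := by
      apply PySem.List.foldl_congr_mem
      intro acc x _
      rw [hperm.count_eq]
    rw [hcnt]
    haveI : RightCommutative (fun (acc x : Int) => max acc ((A.count x : Int))) :=
      ⟨fun b a1 a2 => max_right_comm b ((A.count a1 : Int)) ((A.count a2 : Int))⟩
    exact hperm.foldl_eq 0

-- ===== VERDICT (by name: the statement is the Claim_ definition above) =====
theorem deleteandconquer_spec : Claim_equal_deleteandconquer := by
  intro A _
  unfold Spec_deleteandconquer
  rw [A_max, B_max]
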